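-- pv_equiv track=rewrite | github.com/zssasa/Bioinformatics | Bioinformatics3/week3/MultipleLongestCommonSubsequence.py | MultipleLongestCommonSubsequence
-- ===== SOURCE A (Python) =====
-- def MultipleLongestCommonSubsequence(v, w, u):
-- 	S = [[[0 for _ in range(len(u)+1)] for _ in range(len(w)+1)] for _ in range(len(v)+1)]
-- 	backtrack = [[[0 for _ in range(len(u)+1)] for _ in range(len(w)+1)] for _ in range(len(v)+1)]
--
-- 	for i in range(1,len(v)+1):
-- 		for j in range(1,len(w)+1):
-- 			for k in range(1,len(u)+1):
-- 				scores = [S[i-1][j-1][k-1] + int(v[i-1] == w[j-1] == u[k-1]),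
-- 						  S[i-1][j][k], S[i][j-1][k], S[i][j][k-1],S[i-1][j-1][k], S[i-1][j][k-1], S[i][j-1][k-1]]
-- 				backtrack[i][j][k], S[i][j][k] = max(enumerate(scores), key=lambda p: p[1])
-- 	insert_indel = lambda word, i: word[:i] + '-' + word[i:]
-- 	v_aligned, w_aligned, u_aligned = v, w, u
-- 	i, j, k = len(v), len(w), len(u)
-- 	max_score = S[i][j][k]
-- 	while i*j*k != 0:
-- 		if backtrack[i][j][k] == 1:
-- 			i -= 1
-- 			w_aligned = insert_indel(w_aligned, j)
-- 			u_aligned = insert_indel(u_aligned, k)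
-- 		elif backtrack[i][j][k] == 2:
-- 			j -= 1
-- 			v_aligned = insert_indel(v_aligned, i)
-- 			u_aligned = insert_indel(u_aligned, k)
-- 		elif backtrack[i][j][k] == 3:
-- 			k -= 1
-- 			v_aligned = insert_indel(v_aligned, i)
-- 			w_aligned = insert_indel(w_aligned, j)
-- 		elif backtrack[i][j][k] == 4:
-- 			i -= 1
-- 			j -= 1
-- 			u_aligned = insert_indel(u_aligned, k)
-- 		elif backtrack[i][j][k] == 5:
-- 			i -= 1
-- 			k -= 1
-- 			w_aligned = insert_indel(w_aligned, j)
-- 		elif backtrack[i][j][k] == 6: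
-- 			j -= 1
-- 			k -= 1
-- 			v_aligned = insert_indel(v_aligned, i)
-- 		else:
-- 			i -= 1
-- 			j -= 1
-- 			k -= 1
-- 	while len(v_aligned) != max(len(v_aligned),len(w_aligned),len(u_aligned)):
-- 		v_aligned = insert_indel(v_aligned, 0)
-- 	while len(w_aligned) != max(len(v_aligned),len(w_aligned),len(u_aligned)):
-- 		w_aligned = insert_indel(w_aligned, 0)
-- 	while len(u_aligned) != max(len(v_aligned),len(w_aligned),len(u_aligned)):
-- 		u_aligned = insert_indel(u_aligned, 0)
--
-- 	return str(max_score), v_aligned, w_aligned, u_aligned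
-- ===== SOURCE B (Python) =====
-- def MultipleLongestCommonSubsequence(v, w, u):
--     nv, nw, nu = len(v), len(w), len(u)
--     # forward DP stored in a dictionary keyed by (i,j,k); missing cells read as 0
--     S = {}
--     for i in range(1, nv + 1):
--         for j in range(1, nw + 1):
--             for k in range(1, nu + 1):
--                 sc = [S.get((i-1, j-1, k-1), 0) + (1 if v[i-1] == w[j-1] and v[i-1] == u[k-1] else 0),
--                       S.get((i-1, j, k), 0), S.get((i, j-1, k), 0), S.get((i, j, k-1), 0),
--                       S.get((i-1, j-1, k), 0), S.get((i-1, j, k-1), 0), S.get((i, j-1, k-1), 0)]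
--                 S[(i, j, k)] = max(sc)
--     max_score = S.get((nv, nw, nu), 0)
--     # backtrack without a stored pointer table: recompute the argmax at each cell,
--     # emitting alignment columns from the end; av/aw/au hold the columns reversed
--     i, j, k = nv, nw, nu
--     av, aw, au = [], [], []
--     while i * j * k != 0:
--         sc = [S.get((i-1, j-1, k-1), 0) + (1 if v[i-1] == w[j-1] and v[i-1] == u[k-1] else 0),
--               S.get((i-1, j, k), 0), S.get((i, j-1, k), 0), S.get((i, j, k-1), 0),
--               S.get((i-1, j-1, k), 0), S.get((i-1, j, k-1), 0), S.get((i, j-1, k-1), 0)]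
--         b = sc.index(max(sc))
--         if b == 1:
--             i -= 1; av.append(v[i]); aw.append('-'); au.append('-')
--         elif b == 2:
--             j -= 1; av.append('-'); aw.append(w[j]); au.append('-')
--         elif b == 3:
--             k -= 1; av.append('-'); aw.append('-'); au.append(u[k])
--         elif b == 4:
--             i -= 1; j -= 1; av.append(v[i]); aw.append(w[j]); au.append('-')
--         elif b == 5:
--             i -= 1; k -= 1; av.append(v[i]); aw.append('-'); au.append(u[k])
--         elif b == 6:
--             j -= 1; k -= 1; av.append('-'); aw.append(w[j]); au.append(u[k])
--         else:
--             i -= 1; j -= 1; k -= 1; av.append(v[i]); aw.append(w[j]); au.append(u[k])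
--     # left-over prefixes are kept verbatim and front-padded with '-' to equal length
--     m = max(i, j, k)
--     va = '-' * (m - i) + v[:i] + ''.join(reversed(av))
--     wa = '-' * (m - j) + w[:j] + ''.join(reversed(aw))
--     ua = '-' * (m - k) + u[:k] + ''.join(reversed(au))
--     return str(max_score), va, wa, ua
-- ===== Notes on version B (the rewrite author's own statement) =====
-- stated objective: alternative
-- what changed: B drops A's backtrack pointer table entirely (it recomputes each cell's first-argmax from the score table during reconstruction), stores the DP scores in a dictionary keyed by (i,j,k) instead of a nested list, and emits the aligned strings column-by-column back-to-front with arithmetic front-padding instead of A's repeated string slicing and padding while-loops.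
import Mathlib
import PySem

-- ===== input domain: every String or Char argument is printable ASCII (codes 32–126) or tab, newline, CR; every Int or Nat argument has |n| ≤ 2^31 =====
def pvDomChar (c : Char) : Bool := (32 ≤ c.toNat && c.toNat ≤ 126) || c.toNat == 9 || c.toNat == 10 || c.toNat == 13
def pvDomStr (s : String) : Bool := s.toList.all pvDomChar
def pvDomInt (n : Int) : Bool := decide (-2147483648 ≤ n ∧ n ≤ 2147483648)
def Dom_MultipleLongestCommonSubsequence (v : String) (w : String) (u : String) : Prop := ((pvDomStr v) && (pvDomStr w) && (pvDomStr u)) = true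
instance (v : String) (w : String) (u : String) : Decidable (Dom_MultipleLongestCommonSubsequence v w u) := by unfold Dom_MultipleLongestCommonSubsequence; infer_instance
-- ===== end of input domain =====

-- B drops A's backtrack table (recomputing each argmax from the score table during
-- reconstruction), stores the DP in a dictionary, and builds the alignment columns
-- back-to-front instead of repeatedly slicing strings; objective: alternative.

-- ===== PORT A =====
-- termination facts for the backtracking/padding loops, cited by name in decreasing_by
theorem pvTermPos (i j k : Nat) (h : i * j * k ≠ 0) : 1 ≤ i ∧ 1 ≤ j ∧ 1 ≤ k := by
  simp only [ne_eq, Nat.mul_eq_zero, not_or] at h; omega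

theorem pvTerm1 (i j k : Nat) (h : i * j * k ≠ 0) : i - 1 + j + k < i + j + k := by
  have := pvTermPos i j k h; omega
theorem pvTerm2 (i j k : Nat) (h : i * j * k ≠ 0) : i + (j - 1) + k < i + j + k := by
  have := pvTermPos i j k h; omega
theorem pvTerm3 (i j k : Nat) (h : i * j * k ≠ 0) : i + j + (k - 1) < i + j + k := by
  have := pvTermPos i j k h; omega
theorem pvTerm4 (i j k : Nat) (h : i * j * k ≠ 0) : i - 1 + (j - 1) + k < i + j + k := by
  have := pvTermPos i j k h; omega
theorem pvTerm5 (i j k : Nat) (h : i * j * k ≠ 0) : i - 1 + j + (k - 1) < i + j + k := by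
  have := pvTermPos i j k h; omega
theorem pvTerm6 (i j k : Nat) (h : i * j * k ≠ 0) : i + (j - 1) + (k - 1) < i + j + k := by
  have := pvTermPos i j k h; omega
theorem pvTerm7 (i j k : Nat) (h : i * j * k ≠ 0) : i - 1 + (j - 1) + (k - 1) < i + j + k := by
  have := pvTermPos i j k h; omega

theorem pvTermPad (x : List Char) (a b : Nat) (h : ¬ x.length = max x.length (max a b)) :
    max a b - (x.take 0 ++ ['-'] ++ x.drop 0).length < max a b - x.length := by
  simp only [List.take_zero, List.drop_zero, List.nil_append, List.singleton_append, List.length_cons]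
  rcases Nat.lt_or_ge x.length (max a b) with h1 | h1
  · omega
  · exact absurd (by omega : x.length = max x.length (max a b)) h

-- S[i][j][k] read / write on the nested-list table
def pvTget (t : List (List (List Int))) (i j k : Nat) : Int :=
  ((t.getD i []).getD j []).getD k 0

def pvTset (t : List (List (List Int))) (i j k : Nat) (x : Int) : List (List (List Int)) :=
  t.set i ((t.getD i []).set j (((t.getD i []).getD j []).set k x))

-- insert_indel = lambda word, i: word[:i] + '-' + word[i:]
def pvIns (word : List Char) (p : Nat) : List Char := word.take p ++ ['-'] ++ word.drop p

-- int(v[i-1] == w[j-1] == u[k-1])  (only evaluated with 1 ≤ i,j,k within bounds)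
def pvMatch (v w u : List Char) (i j k : Nat) : Int :=
  if v.getD (i-1) ' ' = w.getD (j-1) ' ' ∧ w.getD (j-1) ' ' = u.getD (k-1) ' ' then 1 else 0

-- the 7-element scores list of A
def pvScores (v w u : List Char) (S : List (List (List Int))) (i j k : Nat) : List Int :=
  [pvTget S (i-1) (j-1) (k-1) + pvMatch v w u i j k,
   pvTget S (i-1) j k, pvTget S i (j-1) k, pvTget S i j (k-1),
   pvTget S (i-1) (j-1) k, pvTget S (i-1) j (k-1), pvTget S i (j-1) (k-1)]

-- max(enumerate(scores), key=lambda p: p[1]) : first maximum wins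
def pvMaxEnumAux : Nat × Int → Nat → List Int → Nat × Int
  | best, _, [] => best
  | best, idx, x :: t => pvMaxEnumAux (if best.2 < x then (idx, x) else best) (idx+1) t

def pvMaxEnum : List Int → Nat × Int
  | [] => (0, 0)           -- unreachable: A's scores list always has 7 elements
  | x :: t => pvMaxEnumAux (0, x) 1 t

def pvInit (nv nw nu : Nat) : List (List (List Int)) :=
  List.replicate (nv+1) (List.replicate (nw+1) (List.replicate (nu+1) (0:Int)))

-- the triple fill loop, producing (S, backtrack)
def pvFillA (v w u : List Char) : List (List (List Int)) × List (List (List Int)) :=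
  (List.range' 1 v.length).foldl (fun st i =>
    (List.range' 1 w.length).foldl (fun st j =>
      (List.range' 1 u.length).foldl (fun st k =>
        let bm := pvMaxEnum (pvScores v w u st.1 i j k)
        (pvTset st.1 i j k bm.2, pvTset st.2 i j k bm.1)) st) st)
    (pvInit v.length w.length u.length, pvInit v.length w.length u.length)

-- the backtracking while-loop of A
def pvBackA (bt : List (List (List Int))) (i j k : Nat) (va wa ua : List Char) :
    List Char × List Char × List Char :=
  if h : i * j * k ≠ 0 then
    let b := pvTget bt i j k
    if b = 1 then pvBackA bt (i-1) j k va (pvIns wa j) (pvIns ua k)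
    else if b = 2 then pvBackA bt i (j-1) k (pvIns va i) wa (pvIns ua k)
    else if b = 3 then pvBackA bt i j (k-1) (pvIns va i) (pvIns wa j) ua
    else if b = 4 then pvBackA bt (i-1) (j-1) k va wa (pvIns ua k)
    else if b = 5 then pvBackA bt (i-1) j (k-1) va (pvIns wa j) ua
    else if b = 6 then pvBackA bt i (j-1) (k-1) (pvIns va i) wa ua
    else pvBackA bt (i-1) (j-1) (k-1) va wa ua
  else (va, wa, ua)
termination_by i + j + k
decreasing_by
  · exact pvTerm1 i j k h
  · exact pvTerm2 i j k h
  · exact pvTerm3 i j k h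
  · exact pvTerm4 i j k h
  · exact pvTerm5 i j k h
  · exact pvTerm6 i j k h
  · exact pvTerm7 i j k h

-- one front-padding while-loop of A
def pvPad (x : List Char) (a b : Nat) : List Char :=
  if h : x.length = max x.length (max a b) then x else pvPad (pvIns x 0) a b
termination_by max a b - x.length
decreasing_by exact pvTermPad x a b h

def MultipleLongestCommonSubsequence (v : String) (w : String) (u : String) :
    String × String × String × String :=
  let lv := v.toList; let lw := w.toList; let lu := u.toList
  let st := pvFillA lv lw lu
  let maxScore := pvTget st.1 lv.length lw.length lu.length
  let r := pvBackA st.2 lv.length lw.length lu.length lv lw lu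
  let va := pvPad r.1 r.2.1.length r.2.2.length
  let wa := pvPad r.2.1 va.length r.2.2.length
  let ua := pvPad r.2.2 va.length wa.length
  (PySem.Int.toStr maxScore, String.ofList va, String.ofList wa, String.ofList ua)

-- ===== PORT B =====
-- S.get((i,j,k), 0)
def pvDget (S : PySem.Dict (Nat × Nat × Nat) Int) (c : Nat × Nat × Nat) : Int :=
  PySem.Dict.getD S c 0

-- 1 if v[i-1] == w[j-1] and v[i-1] == u[k-1] else 0, as B writes it
def pvMatchB (v w u : List Char) (i j k : Nat) : Int :=
  if v.getD (i-1) ' ' = w.getD (j-1) ' ' ∧ v.getD (i-1) ' ' = u.getD (k-1) ' ' then 1 else 0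

-- B's 7-element scores list read from the dictionary
def pvScoresB (v w u : List Char) (S : PySem.Dict (Nat × Nat × Nat) Int) (i j k : Nat) :
    List Int :=
  [pvDget S (i-1, j-1, k-1) + pvMatchB v w u i j k,
   pvDget S (i-1, j, k), pvDget S (i, j-1, k), pvDget S (i, j, k-1),
   pvDget S (i-1, j-1, k), pvDget S (i-1, j, k-1), pvDget S (i, j-1, k-1)]

-- B's fill loop: dictionary of interior cells, value = max(sc)
def pvFillB (v w u : List Char) : PySem.Dict (Nat × Nat × Nat) Int :=
  (List.range' 1 v.length).foldl (fun S i =>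
    (List.range' 1 w.length).foldl (fun S j =>
      (List.range' 1 u.length).foldl (fun S k =>
        PySem.Dict.insert S (i, j, k)
          ((PySem.List.max? (pvScoresB v w u S i j k) (fun y => y)).getD 0)) S) S)
    PySem.Dict.empty

-- B's reconstruction loop: recompute first-argmax, emit columns back-to-front
def pvBackB (v w u : List Char) (S : PySem.Dict (Nat × Nat × Nat) Int) (i j k : Nat)
    (av aw au : List Char) : Nat × Nat × Nat × List Char × List Char × List Char :=
  if h : i * j * k ≠ 0 then
    let sc := pvScoresB v w u S i j k
    let m := (PySem.List.max? sc (fun y => y)).getD 0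
    let b := (PySem.List.index? sc m).getD 0    -- sc.index(max(sc)): always found
    if b = 1 then
      pvBackB v w u S (i-1) j k (av ++ [v.getD (i-1) ' ']) (aw ++ ['-']) (au ++ ['-'])
    else if b = 2 then
      pvBackB v w u S i (j-1) k (av ++ ['-']) (aw ++ [w.getD (j-1) ' ']) (au ++ ['-'])
    else if b = 3 then
      pvBackB v w u S i j (k-1) (av ++ ['-']) (aw ++ ['-']) (au ++ [u.getD (k-1) ' '])
    else if b = 4 then
      pvBackB v w u S (i-1) (j-1) k (av ++ [v.getD (i-1) ' ']) (aw ++ [w.getD (j-1) ' ']) (au ++ ['-'])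
    else if b = 5 then
      pvBackB v w u S (i-1) j (k-1) (av ++ [v.getD (i-1) ' ']) (aw ++ ['-']) (au ++ [u.getD (k-1) ' '])
    else if b = 6 then
      pvBackB v w u S i (j-1) (k-1) (av ++ ['-']) (aw ++ [w.getD (j-1) ' ']) (au ++ [u.getD (k-1) ' '])
    else
      pvBackB v w u S (i-1) (j-1) (k-1) (av ++ [v.getD (i-1) ' ']) (aw ++ [w.getD (j-1) ' ']) (au ++ [u.getD (k-1) ' '])
  else (i, j, k, av, aw, au)
termination_by i + j + k
decreasing_by
  · exact pvTerm1 i j k h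
  · exact pvTerm2 i j k h
  · exact pvTerm3 i j k h
  · exact pvTerm4 i j k h
  · exact pvTerm5 i j k h
  · exact pvTerm6 i j k h
  · exact pvTerm7 i j k h

def MultipleLongestCommonSubsequence_alt (v : String) (w : String) (u : String) :
    String × String × String × String :=
  let lv := v.toList; let lw := w.toList; let lu := u.toList
  let S := pvFillB lv lw lu
  let ms := pvDget S (lv.length, lw.length, lu.length)
  let r := pvBackB lv lw lu S lv.length lw.length lu.length [] [] []
  let m := max r.1 (max r.2.1 r.2.2.1)
  let va := List.replicate (m - r.1) '-' ++ lv.take r.1 ++ r.2.2.2.1.reverse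
  let wa := List.replicate (m - r.2.1) '-' ++ lw.take r.2.1 ++ r.2.2.2.2.1.reverse
  let ua := List.replicate (m - r.2.2.1) '-' ++ lu.take r.2.2.1 ++ r.2.2.2.2.2.reverse
  (PySem.Int.toStr ms, String.ofList va, String.ofList wa, String.ofList ua)

-- ===== PRECONDITION & SPEC =====
def Spec_MultipleLongestCommonSubsequence (v : String) (w : String) (u : String) (out : String × String × String × String) : Prop := out = MultipleLongestCommonSubsequence_alt v w u
instance (v : String) (w : String) (u : String) (out : String × String × String × String) : Decidable (Spec_MultipleLongestCommonSubsequence v w u out) := by unfold Spec_MultipleLongestCommonSubsequence; infer_instance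

-- ===== CLAIM (what is proved, stated in full; the proofs are below) =====
def Claim_equal_MultipleLongestCommonSubsequence : Prop := ∀ (v : String) (w : String) (u : String), Dom_MultipleLongestCommonSubsequence v w u → Spec_MultipleLongestCommonSubsequence v w u (MultipleLongestCommonSubsequence v w u)

-- ===== LEMMAS AND PROOFS =====

-- the mathematical DP value: what both fill loops compute at an interior cell
def pvD (v w u : List Char) (i j k : Nat) : Int :=
  if i = 0 ∨ j = 0 ∨ k = 0 then 0 else
    (pvMaxEnum [pvD v w u (i-1) (j-1) (k-1) + pvMatch v w u i j k,
                pvD v w u (i-1) j k, pvD v w u i (j-1) k, pvD v w u i j (k-1),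
                pvD v w u (i-1) (j-1) k, pvD v w u (i-1) j (k-1), pvD v w u i (j-1) (k-1)]).2
termination_by i + j + k
decreasing_by all_goals (simp only [not_or] at *; omega)

-- A's scores list, expressed through pvD
def pvSc (v w u : List Char) (i j k : Nat) : List Int :=
  [pvD v w u (i-1) (j-1) (k-1) + pvMatch v w u i j k,
   pvD v w u (i-1) j k, pvD v w u i (j-1) k, pvD v w u i j (k-1),
   pvD v w u (i-1) (j-1) k, pvD v w u (i-1) j (k-1), pvD v w u i (j-1) (k-1)]

-- the backtrack pointer A stores and B recomputes
def pvBT (v w u : List Char) (i j k : Nat) : Nat := (pvMaxEnum (pvSc v w u i j k)).1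

theorem pvD_zero (v w u : List Char) (i j k : Nat) (h : i = 0 ∨ j = 0 ∨ k = 0) :
    pvD v w u i j k = 0 := by rw [pvD, if_pos h]

theorem pvD_pos (v w u : List Char) (i j k : Nat) (h1 : 1 ≤ i) (h2 : 1 ≤ j) (h3 : 1 ≤ k) :
    pvD v w u i j k = (pvMaxEnum (pvSc v w u i j k)).2 := by
  rw [pvD, if_neg (by omega), pvSc]

theorem pvMaxEnumAux_key (t : List Int) : ∀ (x : Int) (i0 idx : Nat),
    pvMaxEnumAux (i0, x) idx t =
      if t.foldl max x ≤ x then (i0, x)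
      else (idx + (PySem.List.index? t (t.foldl max x)).getD 0, t.foldl max x) := by
  induction t with
  | nil => intro x i0 idx; simp [pvMaxEnumAux]
  | cons y t' ih =>
    intro x i0 idx
    have hfold : (y :: t').foldl max x = t'.foldl max (max x y) := by simp [List.foldl_cons]
    by_cases hxy : x < y
    · have hmax : max x y = y := by omega
      have hy : y ≤ t'.foldl max y := (PySem.List.le_foldl_max t' y).1
      rw [pvMaxEnumAux, if_pos hxy, ih y idx (idx+1), hfold, hmax,
        if_neg (show ¬ t'.foldl max y ≤ x by omega)]
      by_cases hM : t'.foldl max y ≤ y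
      · rw [if_pos hM, (show t'.foldl max y = y by omega), PySem.List.index?_cons_self]
        simp
      · rw [if_neg hM, PySem.List.index?_cons_of_ne t' (show y ≠ t'.foldl max y by omega)]
        have hMm : t'.foldl max y ∈ t' := by
          rcases PySem.List.foldl_max_mem t' y with h | h
          · omega
          · exact h
        obtain ⟨q, hq⟩ := Option.isSome_iff_exists.1
          ((PySem.List.index?_isSome_iff t' (t'.foldl max y)).2 hMm)
        rw [hq]; simp [Prod.mk.injEq]; omega
    · have hmax : max x y = x := by omega
      rw [pvMaxEnumAux, if_neg hxy, ih x i0 (idx+1), hfold, hmax]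
      by_cases hM : t'.foldl max x ≤ x
      · rw [if_pos hM, if_pos hM]
      · rw [if_neg hM, if_neg hM,
          PySem.List.index?_cons_of_ne t' (show y ≠ t'.foldl max x by omega)]
        have hMm : t'.foldl max x ∈ t' := by
          rcases PySem.List.foldl_max_mem t' x with h | h
          · omega
          · exact h
        obtain ⟨q, hq⟩ := Option.isSome_iff_exists.1
          ((PySem.List.index?_isSome_iff t' (t'.foldl max x)).2 hMm)
        rw [hq]; simp [Prod.mk.injEq]; omega

theorem pvMaxEnum_eq (x : Int) (t : List Int) :
    pvMaxEnum (x :: t) =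
      ((PySem.List.index? (x :: t) (t.foldl max x)).getD 0, t.foldl max x) := by
  rw [pvMaxEnum, pvMaxEnumAux_key]
  have hx : x ≤ t.foldl max x := (PySem.List.le_foldl_max t x).1
  by_cases h : t.foldl max x ≤ x
  · rw [if_pos h, (show t.foldl max x = x by omega), PySem.List.index?_cons_self]
    simp
  · rw [if_neg h, PySem.List.index?_cons_of_ne t (show x ≠ t.foldl max x by omega)]
    have hMm : t.foldl max x ∈ t := by
      rcases PySem.List.foldl_max_mem t x with h' | h'
      · omega
      · exact h'
    obtain ⟨q, hq⟩ := Option.isSome_iff_exists.1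
      ((PySem.List.index?_isSome_iff t (t.foldl max x)).2 hMm)
    rw [hq]; simp [Prod.mk.injEq]; omega

-- ---------- nested-table well-formedness and access lemmas (A side) ----------

theorem pvGetDMem {a : Type} (l : List a) (i : Nat) (d : a) (h : i < l.length) :
    l.getD i d ∈ l := by
  rw [List.getD, List.getElem?_eq_getElem h]; exact List.getElem_mem h

theorem pvSetGetDSelf {a : Type} (l : List a) (i : Nat) (d x : a) (h : i < l.length) :
    (l.set i x).getD i d = x := by
  simp [List.getD, h]

theorem pvSetGetDNe {a : Type} (l : List a) (i j : Nat) (d x : a) (h : i ≠ j) :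
    (l.set i x).getD j d = l.getD j d := by
  simp [List.getD, List.getElem?_set_ne h]

def pvWF (nv nw nu : Nat) (t : List (List (List Int))) : Prop :=
  t.length = nv+1 ∧ ∀ r ∈ t, r.length = nw+1 ∧ ∀ c ∈ r, c.length = nu+1

theorem pvWF_init (nv nw nu : Nat) : pvWF nv nw nu (pvInit nv nw nu) := by
  refine ⟨by simp [pvInit], ?_⟩
  intro r hr
  rw [List.eq_of_mem_replicate hr]
  refine ⟨by simp, ?_⟩
  intro c hc
  rw [List.eq_of_mem_replicate hc]
  simp

theorem pvWF_set (nv nw nu : Nat) (t : List (List (List Int))) (i j k : Nat) (x : Int)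
    (h : pvWF nv nw nu t) : pvWF nv nw nu (pvTset t i j k x) := by
  obtain ⟨h1, h2⟩ := h
  refine ⟨by simp [pvTset, h1], ?_⟩
  intro r hr
  rcases List.mem_or_eq_of_mem_set hr with hr' | hr'
  · exact h2 r hr'
  · subst hr'
    by_cases hi : i < t.length
    · obtain ⟨hl, hcols⟩ := h2 _ (pvGetDMem t i [] hi)
      refine ⟨by rw [List.length_set]; exact hl, ?_⟩
      intro c hc
      rcases List.mem_or_eq_of_mem_set hc with hc' | hc'
      · exact hcols c hc'
      · subst hc'
        by_cases hj : j < (t.getD i []).length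
        · obtain hcl := hcols _ (pvGetDMem _ j [] hj)
          rw [List.length_set]; exact hcl
        · have hget : (t.getD i []).getD j [] = [] := by
            rw [List.getD, List.getElem?_eq_none (by omega)]
            rfl
          rw [hget]
          rw [hget, List.set_eq_of_length_le (by omega)] at hc
          exact hcols _ hc
    · have hts : pvTset t i j k x = t := by
        rw [pvTset]; exact List.set_eq_of_length_le (by omega)
      rw [hts] at hr
      exact h2 _ hr

theorem pvTget_init (nv nw nu a b c : Nat) (ha : a ≤ nv) (hb : b ≤ nw) (hc : c ≤ nu) :
    pvTget (pvInit nv nw nu) a b c = 0 := by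
  have h1 : a < nv+1 := by omega
  have h2 : b < nw+1 := by omega
  have h3 : c < nu+1 := by omega
  simp [pvTget, pvInit, List.getD, h1, h2, h3]

theorem pvTget_set_self (nv nw nu : Nat) (t : List (List (List Int))) (i j k : Nat) (x : Int)
    (h : pvWF nv nw nu t) (hi : i ≤ nv) (hj : j ≤ nw) (hk : k ≤ nu) :
    pvTget (pvTset t i j k x) i j k = x := by
  obtain ⟨h1, h2⟩ := h
  have hi' : i < t.length := by omega
  obtain ⟨hl, hcols⟩ := h2 _ (pvGetDMem t i [] hi')
  have hj' : j < (t.getD i []).length := by omega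
  have hk' : k < ((t.getD i []).getD j []).length := by
    rw [hcols _ (pvGetDMem _ j [] hj')]; omega
  rw [pvTget, pvTset, pvSetGetDSelf _ _ _ _ hi',
    pvSetGetDSelf _ _ _ _ (by simpa using hj'), pvSetGetDSelf _ _ _ _ (by simpa using hk')]

theorem pvTget_set_ne (nv nw nu : Nat) (t : List (List (List Int))) (i j k a b c : Nat)
    (x : Int) (h : pvWF nv nw nu t) (hi : i ≤ nv) (hj : j ≤ nw)
    (hne : ¬(a = i ∧ b = j ∧ c = k)) :
    pvTget (pvTset t i j k x) a b c = pvTget t a b c := by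
  obtain ⟨h1, h2⟩ := h
  by_cases hai : a = i
  · subst hai
    have hi' : a < t.length := by omega
    obtain ⟨hl, hcols⟩ := h2 _ (pvGetDMem t a [] hi')
    rw [pvTget, pvTset, pvSetGetDSelf _ _ _ _ hi']
    by_cases hbj : b = j
    · subst hbj
      have hj' : b < (t.getD a []).length := by omega
      rw [pvSetGetDSelf _ _ _ _ (by simpa using hj')]
      have hck : c ≠ k := by tauto
      rw [pvSetGetDNe _ _ _ _ _ (fun hh => hck hh.symm)]
      rfl
    · rw [pvSetGetDNe _ _ _ _ _ (fun hh => hbj hh.symm)]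
      rfl
  · rw [pvTget, pvTset, pvSetGetDNe _ _ _ _ _ (fun hh => hai hh.symm)]
    rfl

-- ---------- fill-loop characterization ----------

-- processed-region predicates (lexicographic progress of the triple loop)
def pvXI (i : Nat) (a b c : Nat) : Prop := a = 0 ∨ b = 0 ∨ c = 0 ∨ a ≤ i
def pvXJ (i m : Nat) (a b c : Nat) : Prop :=
  a = 0 ∨ b = 0 ∨ c = 0 ∨ a < i ∨ (a = i ∧ b ≤ m)
def pvXK (i j m : Nat) (a b c : Nat) : Prop :=
  a = 0 ∨ b = 0 ∨ c = 0 ∨ a < i ∨ (a = i ∧ b < j) ∨ (a = i ∧ b = j ∧ c ≤ m)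

def pvAgreeA (v w u : List Char) (st : List (List (List Int)) × List (List (List Int)))
    (X : Nat → Nat → Nat → Prop) : Prop :=
  pvWF v.length w.length u.length st.1 ∧ pvWF v.length w.length u.length st.2 ∧
  ∀ a b c, a ≤ v.length → b ≤ w.length → c ≤ u.length → X a b c →
    pvTget st.1 a b c = pvD v w u a b c ∧
    (1 ≤ a → 1 ≤ b → 1 ≤ c → pvTget st.2 a b c = (pvBT v w u a b c : Int))

theorem pvAgreeA_mono (v w u : List Char) (st : List (List (List Int)) × List (List (List Int)))
    (X Y : Nat → Nat → Nat → Prop)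
    (h : pvAgreeA v w u st X)
    (himp : ∀ a b c, a ≤ v.length → b ≤ w.length → c ≤ u.length → Y a b c → X a b c) :
    pvAgreeA v w u st Y :=
  ⟨h.1, h.2.1, fun a b c ha hb hc hy => h.2.2 a b c ha hb hc (himp a b c ha hb hc hy)⟩

-- the three loop bodies of A, named so the fold lemmas can speak about them
def pvStepK (v w u : List Char) (i j : Nat)
    (st : List (List (List Int)) × List (List (List Int))) (k : Nat) :
    List (List (List Int)) × List (List (List Int)) :=
  let bm := pvMaxEnum (pvScores v w u st.1 i j k)
  (pvTset st.1 i j k bm.2, pvTset st.2 i j k (bm.1 : Int))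

def pvStepJ (v w u : List Char) (i : Nat)
    (st : List (List (List Int)) × List (List (List Int))) (j : Nat) :
    List (List (List Int)) × List (List (List Int)) :=
  (List.range' 1 u.length).foldl (pvStepK v w u i j) st

def pvStepI (v w u : List Char)
    (st : List (List (List Int)) × List (List (List Int))) (i : Nat) :
    List (List (List Int)) × List (List (List Int)) :=
  (List.range' 1 w.length).foldl (pvStepJ v w u i) st

theorem pvFillA_eq (v w u : List Char) :
    pvFillA v w u = (List.range' 1 v.length).foldl (pvStepI v w u)
      (pvInit v.length w.length u.length, pvInit v.length w.length u.length) := rfl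

-- one k-step preserves the invariant
theorem pvStepK_agree (v w u : List Char) (i j k : Nat)
    (st : List (List (List Int)) × List (List (List Int)))
    (hi1 : 1 ≤ i) (hi2 : i ≤ v.length) (hj1 : 1 ≤ j) (hj2 : j ≤ w.length)
    (hk1 : 1 ≤ k) (hk2 : k ≤ u.length)
    (h : pvAgreeA v w u st (pvXK i j (k-1))) :
    pvAgreeA v w u (pvStepK v w u i j st k) (pvXK i j k) := by
  obtain ⟨hwf1, hwf2, hag⟩ := h
  have hsc : pvScores v w u st.1 i j k = pvSc v w u i j k := by
    have d1 := hag (i-1) (j-1) (k-1) (by omega) (by omega) (by omega) (by unfold pvXK; omega)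
    have d2 := hag (i-1) j k (by omega) (by omega) (by omega) (by unfold pvXK; omega)
    have d3 := hag i (j-1) k (by omega) (by omega) (by omega) (by unfold pvXK; omega)
    have d4 := hag i j (k-1) (by omega) (by omega) (by omega) (by unfold pvXK; omega)
    have d5 := hag (i-1) (j-1) k (by omega) (by omega) (by omega) (by unfold pvXK; omega)
    have d6 := hag (i-1) j (k-1) (by omega) (by omega) (by omega) (by unfold pvXK; omega)
    have d7 := hag i (j-1) (k-1) (by omega) (by omega) (by omega) (by unfold pvXK; omega)
    rw [pvScores, pvSc, d1.1, d2.1, d3.1, d4.1, d5.1, d6.1, d7.1]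
  refine ⟨pvWF_set _ _ _ _ _ _ _ _ hwf1, pvWF_set _ _ _ _ _ _ _ _ hwf2, ?_⟩
  intro a b c ha hb hc hX
  by_cases htriple : a = i ∧ b = j ∧ c = k
  · obtain ⟨rfl, rfl, rfl⟩ := htriple
    rw [pvStepK]
    constructor
    · show pvTget (pvTset st.1 a b c _) a b c = _
      rw [pvTget_set_self _ _ _ _ _ _ _ _ hwf1 hi2 hj2 hk2, hsc]
      exact (pvD_pos v w u a b c hi1 hj1 hk1).symm
    · intro _ _ _
      show pvTget (pvTset st.2 a b c _) a b c = _
      rw [pvTget_set_self _ _ _ _ _ _ _ _ hwf2 hi2 hj2 hk2, hsc, pvBT]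
  · have hX' : pvXK i j (k-1) a b c := by unfold pvXK at *; omega
    have := hag a b c ha hb hc hX'
    rw [pvStepK]
    constructor
    · show pvTget (pvTset st.1 i j k _) a b c = _
      rw [pvTget_set_ne _ _ _ _ _ _ _ _ _ _ _ hwf1 hi2 hj2 htriple]
      exact this.1
    · intro h1 h2 h3
      show pvTget (pvTset st.2 i j k _) a b c = _
      rw [pvTget_set_ne _ _ _ _ _ _ _ _ _ _ _ hwf2 hi2 hj2 htriple]
      exact this.2 h1 h2 h3

theorem pvRowAuxA (v w u : List Char) (i j : Nat)
    (hi1 : 1 ≤ i) (hi2 : i ≤ v.length) (hj1 : 1 ≤ j) (hj2 : j ≤ w.length) :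
    ∀ (n m : Nat) (st : List (List (List Int)) × List (List (List Int))),
      m + n = u.length → pvAgreeA v w u st (pvXK i j m) →
      pvAgreeA v w u ((List.range' (m+1) n).foldl (pvStepK v w u i j) st) (pvXK i j (m+n)) := by
  intro n
  induction n with
  | zero => intro m st hm h; simpa using h
  | succ n ih =>
    intro m st hm h
    rw [List.range'_succ, List.foldl_cons]
    have hstep := pvStepK_agree v w u i j (m+1) st hi1 hi2 hj1 hj2 (by omega) (by omega)
      (by simpa using h)
    have := ih (m+1) _ (by omega) hstep
    have heq : m + 1 + n = m + (n + 1) := by omega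
    rwa [heq] at this

theorem pvColAuxA (v w u : List Char) (i : Nat) (hi1 : 1 ≤ i) (hi2 : i ≤ v.length) :
    ∀ (n m : Nat) (st : List (List (List Int)) × List (List (List Int))),
      m + n = w.length → pvAgreeA v w u st (pvXJ i m) →
      pvAgreeA v w u ((List.range' (m+1) n).foldl (pvStepJ v w u i) st) (pvXJ i (m+n)) := by
  intro n
  induction n with
  | zero => intro m st hm h; simpa using h
  | succ n ih =>
    intro m st hm h
    rw [List.range'_succ, List.foldl_cons]
    have hrow : pvAgreeA v w u (pvStepJ v w u i st (m+1)) (pvXJ i (m+1)) := by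
      have hstart : pvAgreeA v w u st (pvXK i (m+1) 0) :=
        pvAgreeA_mono v w u st _ _ h (by intro a b c _ _ _ hy; unfold pvXJ pvXK at *; omega)
      have hdone := pvRowAuxA v w u i (m+1) hi1 hi2 (by omega) (by omega)
        u.length 0 st (by omega) (by simpa using hstart)
      rw [pvStepJ]
      refine pvAgreeA_mono v w u _ _ _ (by simpa using hdone) ?_
      intro a b c _ _ hcu hy
      unfold pvXJ pvXK at *
      omega
    have := ih (m+1) _ (by omega) hrow
    have heq : m + 1 + n = m + (n + 1) := by omega
    rwa [heq] at this

theorem pvPlaneAuxA (v w u : List Char) :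
    ∀ (n m : Nat) (st : List (List (List Int)) × List (List (List Int))),
      m + n = v.length → pvAgreeA v w u st (pvXI m) →
      pvAgreeA v w u ((List.range' (m+1) n).foldl (pvStepI v w u) st) (pvXI (m+n)) := by
  intro n
  induction n with
  | zero => intro m st hm h; simpa using h
  | succ n ih =>
    intro m st hm h
    rw [List.range'_succ, List.foldl_cons]
    have hplane : pvAgreeA v w u (pvStepI v w u st (m+1)) (pvXI (m+1)) := by
      have hstart : pvAgreeA v w u st (pvXJ (m+1) 0) :=
        pvAgreeA_mono v w u st _ _ h (by intro a b c _ _ _ hy; unfold pvXI pvXJ at *; omega)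
      have hdone := pvColAuxA v w u (m+1) (by omega) (by omega)
        w.length 0 st (by omega) (by simpa using hstart)
      rw [pvStepI]
      refine pvAgreeA_mono v w u _ _ _ (by simpa using hdone) ?_
      intro a b c _ hbw _ hy
      unfold pvXI pvXJ at *
      omega
    have := ih (m+1) _ (by omega) hplane
    have heq : m + 1 + n = m + (n + 1) := by omega
    rwa [heq] at this

theorem pvFillA_char (v w u : List Char) (a b c : Nat)
    (ha : a ≤ v.length) (hb : b ≤ w.length) (hc : c ≤ u.length) :
    pvTget (pvFillA v w u).1 a b c = pvD v w u a b c ∧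
    (1 ≤ a → 1 ≤ b → 1 ≤ c →
      pvTget (pvFillA v w u).2 a b c = (pvBT v w u a b c : Int)) := by
  have hinit : pvAgreeA v w u
      (pvInit v.length w.length u.length, pvInit v.length w.length u.length) (pvXI 0) := by
    refine ⟨pvWF_init _ _ _, pvWF_init _ _ _, ?_⟩
    intro a' b' c' ha' hb' hc' hX
    have hz : a' = 0 ∨ b' = 0 ∨ c' = 0 := by unfold pvXI at hX; omega
    refine ⟨?_, ?_⟩
    · show pvTget (pvInit _ _ _) a' b' c' = _
      rw [pvTget_init _ _ _ _ _ _ ha' hb' hc', pvD_zero _ _ _ _ _ _ hz]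
    · intro h1 h2 h3; omega
  have hdone := pvPlaneAuxA v w u v.length 0
      (pvInit v.length w.length u.length, pvInit v.length w.length u.length)
      (by omega) (by simpa using hinit)
  rw [pvFillA_eq]
  exact (by simpa using hdone : pvAgreeA v w u _ (pvXI v.length)).2.2 a b c ha hb hc
    (by unfold pvXI; omega)

-- ---------- B-side fill characterization ----------

theorem pvMatchB_eq (v w u : List Char) (i j k : Nat) :
    pvMatchB v w u i j k = pvMatch v w u i j k := by
  rw [pvMatchB, pvMatch]
  split_ifs with h1 h2 h3 <;> try rfl
  · exact absurd ⟨h1.1, h1.1.symm.trans h1.2⟩ h2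
  · exact absurd ⟨h3.1, h3.1.trans h3.2⟩ h1

theorem pvMaxSc (v w u : List Char) (i j k : Nat)
    (h1 : 1 ≤ i) (h2 : 1 ≤ j) (h3 : 1 ≤ k) :
    (PySem.List.max? (pvSc v w u i j k) (fun y => y)).getD 0 = pvD v w u i j k := by
  rw [pvD_pos _ _ _ _ _ _ h1 h2 h3, pvSc, PySem.List.max?_id_cons, pvMaxEnum_eq]
  simp

theorem pvIdxSc (v w u : List Char) (i j k : Nat) :
    (PySem.List.index? (pvSc v w u i j k)
      ((PySem.List.max? (pvSc v w u i j k) (fun y => y)).getD 0)).getD 0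
      = pvBT v w u i j k := by
  rw [pvBT, pvSc, PySem.List.max?_id_cons, pvMaxEnum_eq]
  simp

def pvAgreeB (v w u : List Char) (S : PySem.Dict (Nat × Nat × Nat) Int)
    (X : Nat → Nat → Nat → Prop) : Prop :=
  ∀ a b c, a ≤ v.length → b ≤ w.length → c ≤ u.length → X a b c →
    pvDget S (a, b, c) = pvD v w u a b c

theorem pvAgreeB_mono (v w u : List Char) (S : PySem.Dict (Nat × Nat × Nat) Int)
    (X Y : Nat → Nat → Nat → Prop) (h : pvAgreeB v w u S X)
    (himp : ∀ a b c, a ≤ v.length → b ≤ w.length → c ≤ u.length → Y a b c → X a b c) :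
    pvAgreeB v w u S Y :=
  fun a b c ha hb hc hy => h a b c ha hb hc (himp a b c ha hb hc hy)

def pvStepKB (v w u : List Char) (i j : Nat) (S : PySem.Dict (Nat × Nat × Nat) Int)
    (k : Nat) : PySem.Dict (Nat × Nat × Nat) Int :=
  PySem.Dict.insert S (i, j, k)
    ((PySem.List.max? (pvScoresB v w u S i j k) (fun y => y)).getD 0)

def pvStepJB (v w u : List Char) (i : Nat) (S : PySem.Dict (Nat × Nat × Nat) Int)
    (j : Nat) : PySem.Dict (Nat × Nat × Nat) Int :=
  (List.range' 1 u.length).foldl (pvStepKB v w u i j) S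

def pvStepIB (v w u : List Char) (S : PySem.Dict (Nat × Nat × Nat) Int)
    (i : Nat) : PySem.Dict (Nat × Nat × Nat) Int :=
  (List.range' 1 w.length).foldl (pvStepJB v w u i) S

theorem pvFillB_eq (v w u : List Char) :
    pvFillB v w u = (List.range' 1 v.length).foldl (pvStepIB v w u) PySem.Dict.empty := rfl

theorem pvStepKB_agree (v w u : List Char) (i j k : Nat)
    (S : PySem.Dict (Nat × Nat × Nat) Int)
    (hi1 : 1 ≤ i) (hi2 : i ≤ v.length) (hj1 : 1 ≤ j) (hj2 : j ≤ w.length)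
    (hk1 : 1 ≤ k) (hk2 : k ≤ u.length)
    (h : pvAgreeB v w u S (pvXK i j (k-1))) :
    pvAgreeB v w u (pvStepKB v w u i j S k) (pvXK i j k) := by
  have hsc : pvScoresB v w u S i j k = pvSc v w u i j k := by
    have d1 := h (i-1) (j-1) (k-1) (by omega) (by omega) (by omega) (by unfold pvXK; omega)
    have d2 := h (i-1) j k (by omega) (by omega) (by omega) (by unfold pvXK; omega)
    have d3 := h i (j-1) k (by omega) (by omega) (by omega) (by unfold pvXK; omega)
    have d4 := h i j (k-1) (by omega) (by omega) (by omega) (by unfold pvXK; omega)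
    have d5 := h (i-1) (j-1) k (by omega) (by omega) (by omega) (by unfold pvXK; omega)
    have d6 := h (i-1) j (k-1) (by omega) (by omega) (by omega) (by unfold pvXK; omega)
    have d7 := h i (j-1) (k-1) (by omega) (by omega) (by omega) (by unfold pvXK; omega)
    rw [pvScoresB, pvSc, pvMatchB_eq, d1, d2, d3, d4, d5, d6, d7]
  intro a b c ha hb hc hX
  rw [pvStepKB, pvDget, PySem.Dict.getD_insert]
  by_cases htriple : (a, b, c) = ((i : Nat), (j : Nat), (k : Nat))
  · rw [if_pos htriple, hsc]
    have h1 : a = i := congrArg Prod.fst htriple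
    have h2 : b = j := congrArg (fun p => p.2.1) htriple
    have h3 : c = k := congrArg (fun p => p.2.2) htriple
    subst h1; subst h2; subst h3
    exact pvMaxSc v w u a b c hi1 hj1 hk1
  · rw [if_neg htriple]
    have hX' : pvXK i j (k-1) a b c := by
      have : ¬(a = i ∧ b = j ∧ c = k) := by
        intro ⟨h1, h2, h3⟩; exact htriple (by rw [h1, h2, h3])
      unfold pvXK at *; omega
    exact h a b c ha hb hc hX'

theorem pvRowAuxB (v w u : List Char) (i j : Nat)
    (hi1 : 1 ≤ i) (hi2 : i ≤ v.length) (hj1 : 1 ≤ j) (hj2 : j ≤ w.length) :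
    ∀ (n m : Nat) (S : PySem.Dict (Nat × Nat × Nat) Int),
      m + n = u.length → pvAgreeB v w u S (pvXK i j m) →
      pvAgreeB v w u ((List.range' (m+1) n).foldl (pvStepKB v w u i j) S) (pvXK i j (m+n)) := by
  intro n
  induction n with
  | zero => intro m S hm h; simpa using h
  | succ n ih =>
    intro m S hm h
    rw [List.range'_succ, List.foldl_cons]
    have hstep := pvStepKB_agree v w u i j (m+1) S hi1 hi2 hj1 hj2 (by omega) (by omega)
      (by simpa using h)
    have := ih (m+1) _ (by omega) hstep
    have heq : m + 1 + n = m + (n + 1) := by omega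
    rwa [heq] at this

theorem pvColAuxB (v w u : List Char) (i : Nat) (hi1 : 1 ≤ i) (hi2 : i ≤ v.length) :
    ∀ (n m : Nat) (S : PySem.Dict (Nat × Nat × Nat) Int),
      m + n = w.length → pvAgreeB v w u S (pvXJ i m) →
      pvAgreeB v w u ((List.range' (m+1) n).foldl (pvStepJB v w u i) S) (pvXJ i (m+n)) := by
  intro n
  induction n with
  | zero => intro m S hm h; simpa using h
  | succ n ih =>
    intro m S hm h
    rw [List.range'_succ, List.foldl_cons]
    have hrow : pvAgreeB v w u (pvStepJB v w u i S (m+1)) (pvXJ i (m+1)) := by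
      have hstart : pvAgreeB v w u S (pvXK i (m+1) 0) :=
        pvAgreeB_mono v w u S _ _ h (by intro a b c _ _ _ hy; unfold pvXJ pvXK at *; omega)
      have hdone := pvRowAuxB v w u i (m+1) hi1 hi2 (by omega) (by omega)
        u.length 0 S (by omega) (by simpa using hstart)
      rw [pvStepJB]
      refine pvAgreeB_mono v w u _ _ _ (by simpa using hdone) ?_
      intro a b c _ _ hcu hy
      unfold pvXJ pvXK at *
      omega
    have := ih (m+1) _ (by omega) hrow
    have heq : m + 1 + n = m + (n + 1) := by omega
    rwa [heq] at this

theorem pvPlaneAuxB (v w u : List Char) :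
    ∀ (n m : Nat) (S : PySem.Dict (Nat × Nat × Nat) Int),
      m + n = v.length → pvAgreeB v w u S (pvXI m) →
      pvAgreeB v w u ((List.range' (m+1) n).foldl (pvStepIB v w u) S) (pvXI (m+n)) := by
  intro n
  induction n with
  | zero => intro m S hm h; simpa using h
  | succ n ih =>
    intro m S hm h
    rw [List.range'_succ, List.foldl_cons]
    have hplane : pvAgreeB v w u (pvStepIB v w u S (m+1)) (pvXI (m+1)) := by
      have hstart : pvAgreeB v w u S (pvXJ (m+1) 0) :=
        pvAgreeB_mono v w u S _ _ h (by intro a b c _ _ _ hy; unfold pvXI pvXJ at *; omega)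
      have hdone := pvColAuxB v w u (m+1) (by omega) (by omega)
        w.length 0 S (by omega) (by simpa using hstart)
      rw [pvStepIB]
      refine pvAgreeB_mono v w u _ _ _ (by simpa using hdone) ?_
      intro a b c _ hbw _ hy
      unfold pvXI pvXJ at *
      omega
    have := ih (m+1) _ (by omega) hplane
    have heq : m + 1 + n = m + (n + 1) := by omega
    rwa [heq] at this

theorem pvFillB_char (v w u : List Char) (a b c : Nat)
    (ha : a ≤ v.length) (hb : b ≤ w.length) (hc : c ≤ u.length) :
    pvDget (pvFillB v w u) (a, b, c) = pvD v w u a b c := by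
  have hinit : pvAgreeB v w u PySem.Dict.empty (pvXI 0) := by
    intro a' b' c' ha' hb' hc' hX
    have hz : a' = 0 ∨ b' = 0 ∨ c' = 0 := by unfold pvXI at hX; omega
    rw [pvD_zero _ _ _ _ _ _ hz]
    simp [pvDget, PySem.Dict.getD, PySem.Dict.get?, PySem.Dict.empty]
  have hdone := pvPlaneAuxB v w u v.length 0 PySem.Dict.empty (by omega) (by simpa using hinit)
  rw [pvFillB_eq]
  exact (by simpa using hdone : pvAgreeB v w u _ (pvXI v.length)) a b c ha hb hc
    (by unfold pvXI; omega)

-- ---------- reconstruction-loop equivalence ----------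

theorem pvIns_pref (p t : List Char) : pvIns (p ++ t) p.length = p ++ '-' :: t := by
  rw [pvIns, List.take_left, List.drop_left]
  simp

theorem pvIns_take (w tw : List Char) (j : Nat) (hj : j ≤ w.length) :
    pvIns (w.take j ++ tw) j = w.take j ++ '-' :: tw := by
  have hl : (w.take j).length = j := by simp [List.length_take]; omega
  have hp := pvIns_pref (w.take j) tw
  rwa [hl] at hp

theorem pvTake_decomp (v : List Char) (i : Nat) (h1 : 1 ≤ i) (h2 : i ≤ v.length) :
    v.take i = v.take (i-1) ++ [v.getD (i-1) ' '] := by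
  have hlt : i - 1 < v.length := by omega
  conv_lhs => rw [show i = (i-1)+1 by omega]
  rw [List.take_add_one, List.getElem?_eq_getElem hlt, List.getD, List.getElem?_eq_getElem hlt]
  rfl

-- the branch selector B recomputes
def pvBB (v w u : List Char) (S : PySem.Dict (Nat × Nat × Nat) Int) (i j k : Nat) : Nat :=
  (PySem.List.index? (pvScoresB v w u S i j k)
    ((PySem.List.max? (pvScoresB v w u S i j k) (fun y => y)).getD 0)).getD 0

theorem pvScoresB_eq (v w u : List Char) (S : PySem.Dict (Nat × Nat × Nat) Int)
    (hS : ∀ a b c, a ≤ v.length → b ≤ w.length → c ≤ u.length →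
      pvDget S (a, b, c) = pvD v w u a b c)
    (i j k : Nat) (hi1 : 1 ≤ i) (hi2 : i ≤ v.length) (hj1 : 1 ≤ j) (hj2 : j ≤ w.length)
    (hk1 : 1 ≤ k) (hk2 : k ≤ u.length) :
    pvScoresB v w u S i j k = pvSc v w u i j k := by
  have d1 := hS (i-1) (j-1) (k-1) (by omega) (by omega) (by omega)
  have d2 := hS (i-1) j k (by omega) (by omega) (by omega)
  have d3 := hS i (j-1) k (by omega) (by omega) (by omega)
  have d4 := hS i j (k-1) (by omega) (by omega) (by omega)
  have d5 := hS (i-1) (j-1) k (by omega) (by omega) (by omega)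
  have d6 := hS (i-1) j (k-1) (by omega) (by omega) (by omega)
  have d7 := hS i (j-1) (k-1) (by omega) (by omega) (by omega)
  rw [pvScoresB, pvSc, pvMatchB_eq, d1, d2, d3, d4, d5, d6, d7]

theorem pvBackA_zero (bt : List (List (List Int))) (i j k : Nat) (va wa ua : List Char)
    (h : ¬ i * j * k ≠ 0) : pvBackA bt i j k va wa ua = (va, wa, ua) := by
  rw [pvBackA]
  simp only [dif_neg h]

theorem pvBackA_step (bt : List (List (List Int))) (i j k : Nat) (va wa ua : List Char)
    (h : i * j * k ≠ 0) : pvBackA bt i j k va wa ua =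
    if pvTget bt i j k = 1 then pvBackA bt (i-1) j k va (pvIns wa j) (pvIns ua k)
    else if pvTget bt i j k = 2 then pvBackA bt i (j-1) k (pvIns va i) wa (pvIns ua k)
    else if pvTget bt i j k = 3 then pvBackA bt i j (k-1) (pvIns va i) (pvIns wa j) ua
    else if pvTget bt i j k = 4 then pvBackA bt (i-1) (j-1) k va wa (pvIns ua k)
    else if pvTget bt i j k = 5 then pvBackA bt (i-1) j (k-1) va (pvIns wa j) ua
    else if pvTget bt i j k = 6 then pvBackA bt i (j-1) (k-1) (pvIns va i) wa ua
    else pvBackA bt (i-1) (j-1) (k-1) va wa ua := by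
  rw [pvBackA]
  simp only [dif_pos h]

theorem pvBackB_zero (v w u : List Char) (S : PySem.Dict (Nat × Nat × Nat) Int)
    (i j k : Nat) (av aw au : List Char) (h : ¬ i * j * k ≠ 0) :
    pvBackB v w u S i j k av aw au = (i, j, k, av, aw, au) := by
  rw [pvBackB]
  simp only [dif_neg h]

theorem pvBackB_step (v w u : List Char) (S : PySem.Dict (Nat × Nat × Nat) Int)
    (i j k : Nat) (av aw au : List Char) (h : i * j * k ≠ 0) :
    pvBackB v w u S i j k av aw au =
    if pvBB v w u S i j k = 1 then
      pvBackB v w u S (i-1) j k (av ++ [v.getD (i-1) ' ']) (aw ++ ['-']) (au ++ ['-'])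
    else if pvBB v w u S i j k = 2 then
      pvBackB v w u S i (j-1) k (av ++ ['-']) (aw ++ [w.getD (j-1) ' ']) (au ++ ['-'])
    else if pvBB v w u S i j k = 3 then
      pvBackB v w u S i j (k-1) (av ++ ['-']) (aw ++ ['-']) (au ++ [u.getD (k-1) ' '])
    else if pvBB v w u S i j k = 4 then
      pvBackB v w u S (i-1) (j-1) k (av ++ [v.getD (i-1) ' ']) (aw ++ [w.getD (j-1) ' ']) (au ++ ['-'])
    else if pvBB v w u S i j k = 5 then
      pvBackB v w u S (i-1) j (k-1) (av ++ [v.getD (i-1) ' ']) (aw ++ ['-']) (au ++ [u.getD (k-1) ' '])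
    else if pvBB v w u S i j k = 6 then
      pvBackB v w u S i (j-1) (k-1) (av ++ ['-']) (aw ++ [w.getD (j-1) ' ']) (au ++ [u.getD (k-1) ' '])
    else
      pvBackB v w u S (i-1) (j-1) (k-1) (av ++ [v.getD (i-1) ' ']) (aw ++ [w.getD (j-1) ' ']) (au ++ [u.getD (k-1) ' ']) := by
  rw [pvBackB]
  simp only [dif_pos h, pvBB]
  rfl

theorem pvBackB_acc (v w u : List Char) (S : PySem.Dict (Nat × Nat × Nat) Int) :
    ∀ (n : Nat), ∀ (i j k : Nat), i + j + k ≤ n → ∀ (av aw au : List Char),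
    pvBackB v w u S i j k av aw au =
      ((pvBackB v w u S i j k [] [] []).1,
       (pvBackB v w u S i j k [] [] []).2.1,
       (pvBackB v w u S i j k [] [] []).2.2.1,
       av ++ (pvBackB v w u S i j k [] [] []).2.2.2.1,
       aw ++ (pvBackB v w u S i j k [] [] []).2.2.2.2.1,
       au ++ (pvBackB v w u S i j k [] [] []).2.2.2.2.2) := by
  intro n
  induction n with
  | zero =>
    intro i j k hn av aw au
    have hi0 : i = 0 := by omega
    have h : ¬ i * j * k ≠ 0 := by simp [hi0]
    rw [pvBackB_zero v w u S i j k av aw au h, pvBackB_zero v w u S i j k [] [] [] h]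
    simp
  | succ n ih =>
    intro i j k hn av aw au
    by_cases h : i * j * k ≠ 0
    · have hijk : 1 ≤ i ∧ 1 ≤ j ∧ 1 ≤ k := by
        simp only [ne_eq, Nat.mul_eq_zero, not_or] at h; omega
      rw [pvBackB_step v w u S i j k av aw au h, pvBackB_step v w u S i j k [] [] [] h]
      split_ifs
      · rw [ih (i-1) j k (by omega) (av ++ [v.getD (i-1) ' ']) (aw ++ ['-']) (au ++ ['-']),
          ih (i-1) j k (by omega) ([] ++ [v.getD (i-1) ' ']) ([] ++ ['-']) ([] ++ ['-'])]
        simp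
      · rw [ih i (j-1) k (by omega) (av ++ ['-']) (aw ++ [w.getD (j-1) ' ']) (au ++ ['-']),
          ih i (j-1) k (by omega) ([] ++ ['-']) ([] ++ [w.getD (j-1) ' ']) ([] ++ ['-'])]
        simp
      · rw [ih i j (k-1) (by omega) (av ++ ['-']) (aw ++ ['-']) (au ++ [u.getD (k-1) ' ']),
          ih i j (k-1) (by omega) ([] ++ ['-']) ([] ++ ['-']) ([] ++ [u.getD (k-1) ' '])]
        simp
      · rw [ih (i-1) (j-1) k (by omega) (av ++ [v.getD (i-1) ' ']) (aw ++ [w.getD (j-1) ' ']) (au ++ ['-']),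
          ih (i-1) (j-1) k (by omega) ([] ++ [v.getD (i-1) ' ']) ([] ++ [w.getD (j-1) ' ']) ([] ++ ['-'])]
        simp
      · rw [ih (i-1) j (k-1) (by omega) (av ++ [v.getD (i-1) ' ']) (aw ++ ['-']) (au ++ [u.getD (k-1) ' ']),
          ih (i-1) j (k-1) (by omega) ([] ++ [v.getD (i-1) ' ']) ([] ++ ['-']) ([] ++ [u.getD (k-1) ' '])]
        simp
      · rw [ih i (j-1) (k-1) (by omega) (av ++ ['-']) (aw ++ [w.getD (j-1) ' ']) (au ++ [u.getD (k-1) ' ']),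
          ih i (j-1) (k-1) (by omega) ([] ++ ['-']) ([] ++ [w.getD (j-1) ' ']) ([] ++ [u.getD (k-1) ' '])]
        simp
      · rw [ih (i-1) (j-1) (k-1) (by omega) (av ++ [v.getD (i-1) ' ']) (aw ++ [w.getD (j-1) ' ']) (au ++ [u.getD (k-1) ' ']),
          ih (i-1) (j-1) (k-1) (by omega) ([] ++ [v.getD (i-1) ' ']) ([] ++ [w.getD (j-1) ' ']) ([] ++ [u.getD (k-1) ' '])]
        simp
    · rw [pvBackB_zero v w u S i j k av aw au h, pvBackB_zero v w u S i j k [] [] [] h]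
      simp

theorem pvBackB_props (v w u : List Char) (S : PySem.Dict (Nat × Nat × Nat) Int) :
    ∀ (n : Nat), ∀ (i j k : Nat), i + j + k ≤ n →
    (pvBackB v w u S i j k [] [] []).1 ≤ i ∧
    (pvBackB v w u S i j k [] [] []).2.1 ≤ j ∧
    (pvBackB v w u S i j k [] [] []).2.2.1 ≤ k ∧
    (pvBackB v w u S i j k [] [] []).2.2.2.1.length = (pvBackB v w u S i j k [] [] []).2.2.2.2.1.length ∧
    (pvBackB v w u S i j k [] [] []).2.2.2.1.length = (pvBackB v w u S i j k [] [] []).2.2.2.2.2.length := by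
  intro n
  induction n with
  | zero =>
    intro i j k hn
    have hi0 : i = 0 := by omega
    have h : ¬ i * j * k ≠ 0 := by simp [hi0]
    rw [pvBackB_zero v w u S i j k [] [] [] h]
    simp
  | succ n ih =>
    intro i j k hn
    by_cases h : i * j * k ≠ 0
    · have hijk : 1 ≤ i ∧ 1 ≤ j ∧ 1 ≤ k := by
        simp only [ne_eq, Nat.mul_eq_zero, not_or] at h; omega
      rw [pvBackB_step v w u S i j k [] [] [] h]
      split_ifs
      all_goals first
      | (rw [pvBackB_acc v w u S n (i-1) j k (by omega)]
         have := ih (i-1) j k (by omega); simp at this ⊢; omega)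
      | (rw [pvBackB_acc v w u S n i (j-1) k (by omega)]
         have := ih i (j-1) k (by omega); simp at this ⊢; omega)
      | (rw [pvBackB_acc v w u S n i j (k-1) (by omega)]
         have := ih i j (k-1) (by omega); simp at this ⊢; omega)
      | (rw [pvBackB_acc v w u S n (i-1) (j-1) k (by omega)]
         have := ih (i-1) (j-1) k (by omega); simp at this ⊢; omega)
      | (rw [pvBackB_acc v w u S n (i-1) j (k-1) (by omega)]
         have := ih (i-1) j (k-1) (by omega); simp at this ⊢; omega)
      | (rw [pvBackB_acc v w u S n i (j-1) (k-1) (by omega)]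
         have := ih i (j-1) (k-1) (by omega); simp at this ⊢; omega)
      | (rw [pvBackB_acc v w u S n (i-1) (j-1) (k-1) (by omega)]
         have := ih (i-1) (j-1) (k-1) (by omega); simp at this ⊢; omega)
    · rw [pvBackB_zero v w u S i j k [] [] [] h]
      simp

theorem pvBackAB (v w u : List Char) (bt : List (List (List Int)))
    (S : PySem.Dict (Nat × Nat × Nat) Int)
    (hBT : ∀ a b c : Nat, 1 ≤ a → a ≤ v.length → 1 ≤ b → b ≤ w.length → 1 ≤ c → c ≤ u.length →
      pvTget bt a b c = (pvBT v w u a b c : Int))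
    (hS : ∀ a b c : Nat, a ≤ v.length → b ≤ w.length → c ≤ u.length →
      pvDget S (a, b, c) = pvD v w u a b c) :
    ∀ (n : Nat), ∀ (i j k : Nat), i + j + k ≤ n →
      i ≤ v.length → j ≤ w.length → k ≤ u.length → ∀ (tv tw tu : List Char),
    pvBackA bt i j k (v.take i ++ tv) (w.take j ++ tw) (u.take k ++ tu) =
      (v.take (pvBackB v w u S i j k [] [] []).1 ++
         (pvBackB v w u S i j k [] [] []).2.2.2.1.reverse ++ tv,
       w.take (pvBackB v w u S i j k [] [] []).2.1 ++
         (pvBackB v w u S i j k [] [] []).2.2.2.2.1.reverse ++ tw,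
       u.take (pvBackB v w u S i j k [] [] []).2.2.1 ++
         (pvBackB v w u S i j k [] [] []).2.2.2.2.2.reverse ++ tu) := by
  intro n
  induction n with
  | zero =>
    intro i j k hn hi hj hk tv tw tu
    have hi0 : i = 0 := by omega
    have h : ¬ i * j * k ≠ 0 := by simp [hi0]
    rw [pvBackA_zero bt i j k _ _ _ h, pvBackB_zero v w u S i j k [] [] [] h]
    simp
  | succ n ih =>
    intro i j k hn hi hj hk tv tw tu
    by_cases h : i * j * k ≠ 0
    · have hijk : 1 ≤ i ∧ 1 ≤ j ∧ 1 ≤ k := by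
        simp only [ne_eq, Nat.mul_eq_zero, not_or] at h; omega
      have hsc := pvScoresB_eq v w u S hS i j k (by omega) hi (by omega) hj (by omega) hk
      have hbb : pvBB v w u S i j k = pvBT v w u i j k := by
        rw [pvBB, hsc]; exact pvIdxSc v w u i j k
      have hbt := hBT i j k (by omega) hi (by omega) hj (by omega) hk
      rw [pvBackA_step bt i j k _ _ _ h, pvBackB_step v w u S i j k [] [] [] h, hbt, hbb]
      by_cases hb1 : pvBT v w u i j k = 1
      · rw [if_pos (show ((pvBT v w u i j k : Int)) = 1 by exact_mod_cast hb1), if_pos hb1]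
        have hIH := ih (i-1) j k (by omega) (by omega) (by omega) (by omega) ((v.getD (i-1) ' ') :: tv) ('-' :: tw) ('-' :: tu)
        rw [pvIns_take w tw j hj, pvIns_take u tu k hk]
        rw [pvTake_decomp v i (by omega) hi]
        simp only [List.append_assoc, List.singleton_append]
        rw [hIH, pvBackB_acc v w u S n (i-1) j k (by omega) ([] ++ [v.getD (i-1) ' ']) ([] ++ ['-']) ([] ++ ['-'])]
        simp [List.append_assoc]
      · rw [if_neg (show ¬((pvBT v w u i j k : Int)) = 1 from fun hc => hb1 (by exact_mod_cast hc)), if_neg hb1]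
        by_cases hb2 : pvBT v w u i j k = 2
        · rw [if_pos (show ((pvBT v w u i j k : Int)) = 2 by exact_mod_cast hb2), if_pos hb2]
          have hIH := ih i (j-1) k (by omega) (by omega) (by omega) (by omega) ('-' :: tv) ((w.getD (j-1) ' ') :: tw) ('-' :: tu)
          rw [pvIns_take v tv i hi, pvIns_take u tu k hk]
          rw [pvTake_decomp w j (by omega) hj]
          simp only [List.append_assoc, List.singleton_append]
          rw [hIH, pvBackB_acc v w u S n i (j-1) k (by omega) ([] ++ ['-']) ([] ++ [w.getD (j-1) ' ']) ([] ++ ['-'])]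
          simp [List.append_assoc]
        · rw [if_neg (show ¬((pvBT v w u i j k : Int)) = 2 from fun hc => hb2 (by exact_mod_cast hc)), if_neg hb2]
          by_cases hb3 : pvBT v w u i j k = 3
          · rw [if_pos (show ((pvBT v w u i j k : Int)) = 3 by exact_mod_cast hb3), if_pos hb3]
            have hIH := ih i j (k-1) (by omega) (by omega) (by omega) (by omega) ('-' :: tv) ('-' :: tw) ((u.getD (k-1) ' ') :: tu)
            rw [pvIns_take v tv i hi, pvIns_take w tw j hj]
            rw [pvTake_decomp u k (by omega) hk]
            simp only [List.append_assoc, List.singleton_append]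
            rw [hIH, pvBackB_acc v w u S n i j (k-1) (by omega) ([] ++ ['-']) ([] ++ ['-']) ([] ++ [u.getD (k-1) ' '])]
            simp [List.append_assoc]
          · rw [if_neg (show ¬((pvBT v w u i j k : Int)) = 3 from fun hc => hb3 (by exact_mod_cast hc)), if_neg hb3]
            by_cases hb4 : pvBT v w u i j k = 4
            · rw [if_pos (show ((pvBT v w u i j k : Int)) = 4 by exact_mod_cast hb4), if_pos hb4]
              have hIH := ih (i-1) (j-1) k (by omega) (by omega) (by omega) (by omega) ((v.getD (i-1) ' ') :: tv) ((w.getD (j-1) ' ') :: tw) ('-' :: tu)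
              rw [pvIns_take u tu k hk]
              rw [pvTake_decomp v i (by omega) hi, pvTake_decomp w j (by omega) hj]
              simp only [List.append_assoc, List.singleton_append]
              rw [hIH, pvBackB_acc v w u S n (i-1) (j-1) k (by omega) ([] ++ [v.getD (i-1) ' ']) ([] ++ [w.getD (j-1) ' ']) ([] ++ ['-'])]
              simp [List.append_assoc]
            · rw [if_neg (show ¬((pvBT v w u i j k : Int)) = 4 from fun hc => hb4 (by exact_mod_cast hc)), if_neg hb4]
              by_cases hb5 : pvBT v w u i j k = 5
              · rw [if_pos (show ((pvBT v w u i j k : Int)) = 5 by exact_mod_cast hb5), if_pos hb5]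
                have hIH := ih (i-1) j (k-1) (by omega) (by omega) (by omega) (by omega) ((v.getD (i-1) ' ') :: tv) ('-' :: tw) ((u.getD (k-1) ' ') :: tu)
                rw [pvIns_take w tw j hj]
                rw [pvTake_decomp v i (by omega) hi, pvTake_decomp u k (by omega) hk]
                simp only [List.append_assoc, List.singleton_append]
                rw [hIH, pvBackB_acc v w u S n (i-1) j (k-1) (by omega) ([] ++ [v.getD (i-1) ' ']) ([] ++ ['-']) ([] ++ [u.getD (k-1) ' '])]
                simp [List.append_assoc]
              · rw [if_neg (show ¬((pvBT v w u i j k : Int)) = 5 from fun hc => hb5 (by exact_mod_cast hc)), if_neg hb5]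
                by_cases hb6 : pvBT v w u i j k = 6
                · rw [if_pos (show ((pvBT v w u i j k : Int)) = 6 by exact_mod_cast hb6), if_pos hb6]
                  have hIH := ih i (j-1) (k-1) (by omega) (by omega) (by omega) (by omega) ('-' :: tv) ((w.getD (j-1) ' ') :: tw) ((u.getD (k-1) ' ') :: tu)
                  rw [pvIns_take v tv i hi]
                  rw [pvTake_decomp w j (by omega) hj, pvTake_decomp u k (by omega) hk]
                  simp only [List.append_assoc, List.singleton_append]
                  rw [hIH, pvBackB_acc v w u S n i (j-1) (k-1) (by omega) ([] ++ ['-']) ([] ++ [w.getD (j-1) ' ']) ([] ++ [u.getD (k-1) ' '])]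
                  simp [List.append_assoc]
                · rw [if_neg (show ¬((pvBT v w u i j k : Int)) = 6 from fun hc => hb6 (by exact_mod_cast hc)), if_neg hb6]
                  have hIH := ih (i-1) (j-1) (k-1) (by omega) (by omega) (by omega) (by omega) ((v.getD (i-1) ' ') :: tv) ((w.getD (j-1) ' ') :: tw) ((u.getD (k-1) ' ') :: tu)
                  rw [pvTake_decomp v i (by omega) hi, pvTake_decomp w j (by omega) hj, pvTake_decomp u k (by omega) hk]
                  simp only [List.append_assoc, List.singleton_append]
                  rw [hIH, pvBackB_acc v w u S n (i-1) (j-1) (k-1) (by omega) ([] ++ [v.getD (i-1) ' ']) ([] ++ [w.getD (j-1) ' ']) ([] ++ [u.getD (k-1) ' '])]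
                  simp [List.append_assoc]
    · rw [pvBackA_zero bt i j k _ _ _ h, pvBackB_zero v w u S i j k [] [] [] h]
      simp

-- ---------- padding ----------

theorem pvPad_eq (x : List Char) (a b : Nat) :
    pvPad x a b = List.replicate (max a b - x.length) '-' ++ x := by
  fun_induction pvPad x a b with
  | case1 x h =>
    have : max a b ≤ x.length := by omega
    rw [Nat.sub_eq_zero_of_le this]
    simp
  | case2 x h ih =>
    have hlt : x.length < max a b := by
      rcases Nat.lt_or_ge x.length (max a b) with h1 | h1
      · exact h1
      · exact absurd (by omega : x.length = max x.length (max a b)) h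
    have hx : pvIns x 0 = '-' :: x := by simp [pvIns]
    rw [hx] at ih ⊢
    rw [ih]
    have hc : max a b - x.length = (max a b - ('-' :: x).length) + 1 := by
      simp [List.length_cons]; omega
    rw [hc, List.replicate_succ', List.length_cons]
    simp

theorem pvPadMatch (p1 q1 r1 : List Char) (i' j' k' C : Nat)
    (h1 : p1.length = i' + C) (h2 : q1.length = j' + C) (h3 : r1.length = k' + C) :
    pvPad p1 q1.length r1.length = List.replicate (max i' (max j' k') - i') '-' ++ p1 ∧
    pvPad q1 (pvPad p1 q1.length r1.length).length r1.length
      = List.replicate (max i' (max j' k') - j') '-' ++ q1 ∧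
    pvPad r1 (pvPad p1 q1.length r1.length).length
      (pvPad q1 (pvPad p1 q1.length r1.length).length r1.length).length
      = List.replicate (max i' (max j' k') - k') '-' ++ r1 := by
  have e1 : pvPad p1 q1.length r1.length
      = List.replicate (max q1.length r1.length - p1.length) '-' ++ p1 := pvPad_eq _ _ _
  have c1 : max q1.length r1.length - p1.length = max i' (max j' k') - i' := by
    rw [h1, h2, h3]; omega
  have l1 : (pvPad p1 q1.length r1.length).length = max i' (max j' k') + C := by
    rw [e1, List.length_append, List.length_replicate, h1, h2, h3]; omega
  have e2 : pvPad q1 (pvPad p1 q1.length r1.length).length r1.length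
      = List.replicate (max (pvPad p1 q1.length r1.length).length r1.length - q1.length) '-'
        ++ q1 := pvPad_eq _ _ _
  have c2 : max (pvPad p1 q1.length r1.length).length r1.length - q1.length
      = max i' (max j' k') - j' := by
    rw [l1, h2, h3]; omega
  have l2 : (pvPad q1 (pvPad p1 q1.length r1.length).length r1.length).length
      = max i' (max j' k') + C := by
    rw [e2, List.length_append, List.length_replicate, c2, h2]; omega
  have e3 : pvPad r1 (pvPad p1 q1.length r1.length).length
      (pvPad q1 (pvPad p1 q1.length r1.length).length r1.length).length
      = List.replicate (max (pvPad p1 q1.length r1.length).length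
          (pvPad q1 (pvPad p1 q1.length r1.length).length r1.length).length - r1.length) '-'
        ++ r1 := pvPad_eq _ _ _
  have c3 : max (pvPad p1 q1.length r1.length).length
      (pvPad q1 (pvPad p1 q1.length r1.length).length r1.length).length - r1.length
      = max i' (max j' k') - k' := by
    rw [l2, l1, h3]; omega
  exact ⟨by rw [e1, c1], by rw [e2, c2], by rw [e3, c3]⟩

theorem pv_main (v w u : String) :
    MultipleLongestCommonSubsequence v w u = MultipleLongestCommonSubsequence_alt v w u := by
  simp only [MultipleLongestCommonSubsequence, MultipleLongestCommonSubsequence_alt]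
  have hBT : ∀ a b c : Nat, 1 ≤ a → a ≤ v.toList.length → 1 ≤ b → b ≤ w.toList.length →
      1 ≤ c → c ≤ u.toList.length →
      pvTget (pvFillA v.toList w.toList u.toList).2 a b c
        = (pvBT v.toList w.toList u.toList a b c : Int) :=
    fun a b c h1 h2 h3 h4 h5 h6 =>
      (pvFillA_char v.toList w.toList u.toList a b c h2 h4 h6).2 h1 h3 h5
  have hS : ∀ a b c : Nat, a ≤ v.toList.length → b ≤ w.toList.length → c ≤ u.toList.length →
      pvDget (pvFillB v.toList w.toList u.toList) (a, b, c)
        = pvD v.toList w.toList u.toList a b c :=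
    fun a b c h1 h2 h3 => pvFillB_char v.toList w.toList u.toList a b c h1 h2 h3
  have hms : pvTget (pvFillA v.toList w.toList u.toList).1
      v.toList.length w.toList.length u.toList.length
      = pvDget (pvFillB v.toList w.toList u.toList)
        (v.toList.length, w.toList.length, u.toList.length) := by
    rw [(pvFillA_char v.toList w.toList u.toList _ _ _ (le_refl _) (le_refl _) (le_refl _)).1,
      hS _ _ _ (le_refl _) (le_refl _) (le_refl _)]
  have hback := pvBackAB v.toList w.toList u.toList
    (pvFillA v.toList w.toList u.toList).2 (pvFillB v.toList w.toList u.toList) hBT hS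
    (v.toList.length + w.toList.length + u.toList.length)
    v.toList.length w.toList.length u.toList.length (le_refl _)
    (le_refl _) (le_refl _) (le_refl _) [] [] []
  simp only [List.take_length, List.append_nil] at hback
  obtain ⟨hp1, hp2, hp3, hp4, hp5⟩ := pvBackB_props v.toList w.toList u.toList
    (pvFillB v.toList w.toList u.toList)
    (v.toList.length + w.toList.length + u.toList.length)
    v.toList.length w.toList.length u.toList.length (le_refl _)
  set E := pvBackB v.toList w.toList u.toList (pvFillB v.toList w.toList u.toList)
    v.toList.length w.toList.length u.toList.length [] [] [] with hE
  have h1 : (v.toList.take E.1 ++ E.2.2.2.1.reverse).length = E.1 + E.2.2.2.1.length := by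
    simp only [List.length_append, List.length_reverse, List.length_take]; omega
  have h2 : (w.toList.take E.2.1 ++ E.2.2.2.2.1.reverse).length = E.2.1 + E.2.2.2.1.length := by
    simp only [List.length_append, List.length_reverse, List.length_take]; omega
  have h3 : (u.toList.take E.2.2.1 ++ E.2.2.2.2.2.reverse).length
      = E.2.2.1 + E.2.2.2.1.length := by
    simp only [List.length_append, List.length_reverse, List.length_take]; omega
  obtain ⟨hpad1, hpad2, hpad3⟩ := pvPadMatch
    (v.toList.take E.1 ++ E.2.2.2.1.reverse)
    (w.toList.take E.2.1 ++ E.2.2.2.2.1.reverse)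
    (u.toList.take E.2.2.1 ++ E.2.2.2.2.2.reverse)
    E.1 E.2.1 E.2.2.1 E.2.2.2.1.length h1 h2 h3
  rw [hback, hms]
  rw [hpad3, hpad2, hpad1]
  simp [List.append_assoc]

-- ===== VERDICT (by name: the statement is the Claim_ definition above) =====
theorem MultipleLongestCommonSubsequence_spec : Claim_equal_MultipleLongestCommonSubsequence := by
  intro v w u _
  show _ = _
  exact pv_main v w u
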